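-- pv_equiv track=rewrite | github.com/Amged-Elsheikh/100-Days-of-Code | Day 11 Blackjack.py | handle_ace
-- ===== SOURCE A (Python) =====
-- def handle_ace(sum, ace):
--     while ace != 0:
--         if sum + 11 <= 21:
--             sum += 11
--         else:
--             sum += 1
--         ace -= 1
--     return sum
-- ===== SOURCE B (Python) =====
-- def handle_ace(sum, ace):
--     # Closed form: the loop scores aces as 11 while the running total stays <= 10,
--     # then as 1.  k = number of aces scored as 11.
--     if ace <= 0 or sum > 10:
--         k = 0
--     else:
--         k = min(ace, (10 - sum) // 11 + 1)
--     return sum + 11 * k + (ace - k)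
-- ===== Notes on version B (the rewrite author's own statement) =====
-- stated objective: simpler
-- what changed: Replaced the while-loop over ace with a closed-form arithmetic expression: count k = min(ace, (10-sum)//11 + 1) aces scored as 11 (0 if sum > 10) and return sum + 11*k + (ace - k).
import Mathlib
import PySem

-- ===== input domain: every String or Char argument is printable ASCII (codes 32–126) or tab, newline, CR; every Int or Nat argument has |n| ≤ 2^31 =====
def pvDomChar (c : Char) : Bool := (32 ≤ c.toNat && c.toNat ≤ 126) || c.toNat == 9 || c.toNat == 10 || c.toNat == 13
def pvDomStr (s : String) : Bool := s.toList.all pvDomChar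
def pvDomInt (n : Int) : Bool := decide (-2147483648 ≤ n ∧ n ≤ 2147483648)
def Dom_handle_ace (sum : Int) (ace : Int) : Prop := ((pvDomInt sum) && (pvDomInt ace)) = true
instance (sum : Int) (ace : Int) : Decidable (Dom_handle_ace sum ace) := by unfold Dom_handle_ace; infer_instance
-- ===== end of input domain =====

-- B replaces A's while-loop over ace with a closed-form arithmetic expression (simpler, O(1)).
-- Pre_ excludes ace < 0, on which A's while-loop never terminates.


-- ===== PORT A =====
-- A's while-loop, one step per remaining ace (faithful for ace ≥ 0; Pre_ excludes ace < 0,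
-- where the Python loop never terminates).
def handleAceLoop : Int → Nat → Int
  | s, 0 => s
  | s, n + 1 => if s + 11 ≤ 21 then handleAceLoop (s + 11) n else handleAceLoop (s + 1) n

def handle_ace (sum : Int) (ace : Int) : Int := handleAceLoop sum ace.toNat

-- ===== PORT B =====
def handle_ace_alt (sum : Int) (ace : Int) : Int :=
  let k : Int := if ace ≤ 0 ∨ sum > 10 then 0
                 else min ace (PySem.Int.floordiv (10 - sum) 11 + 1)
  sum + 11 * k + (ace - k)

-- ===== PRECONDITION & SPEC =====
-- Pre_ excludes ace < 0: there the Python A loops forever (ace -= 1 never reaches 0).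
def Pre_handle_ace (_sum : Int) (ace : Int) : Prop := 0 ≤ ace
instance (sum : Int) (ace : Int) : Decidable (Pre_handle_ace sum ace) := by unfold Pre_handle_ace; infer_instance
def pvWitness_handle_ace : Int × Int := (10, 2)

def Spec_handle_ace (sum : Int) (ace : Int) (out : Int) : Prop := out = handle_ace_alt sum ace
instance (sum : Int) (ace : Int) (out : Int) : Decidable (Spec_handle_ace sum ace out) := by unfold Spec_handle_ace; infer_instance

-- ===== CLAIM =====
def Claim_equal_handle_ace : Prop := ∀ (sum : Int) (ace : Int), Dom_handle_ace sum ace → Pre_handle_ace sum ace → Spec_handle_ace sum ace (handle_ace sum ace)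

-- ===== LEMMAS AND PROOFS =====
theorem handleAceLoop_eq_alt (n : Nat) : ∀ (s : Int), handleAceLoop s n = handle_ace_alt s (n : Int) := by
  induction n with
  | zero =>
    intro s
    simp [handleAceLoop, handle_ace_alt]
  | succ n ih =>
    intro s
    have h11 : (0:Int) < 11 := by omega
    rw [show ((n + 1 : Nat) : Int) = (n : Int) + 1 by push_cast; ring]
    by_cases hs : s + 11 ≤ 21
    · rw [handleAceLoop, if_pos hs, ih]
      simp only [handle_ace_alt]
      have hq := PySem.Int.floordiv_mul_add_mod (10 - s) 11
      have hm : 0 ≤ PySem.Int.mod (10 - s) 11 ∧ PySem.Int.mod (10 - s) 11 < 11 :=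
        ⟨PySem.Int.mod_nonneg _ h11, PySem.Int.mod_lt _ h11⟩
      have hq' := PySem.Int.floordiv_mul_add_mod (10 - (s + 11)) 11
      have hm' : 0 ≤ PySem.Int.mod (10 - (s + 11)) 11 ∧ PySem.Int.mod (10 - (s + 11)) 11 < 11 :=
        ⟨PySem.Int.mod_nonneg _ h11, PySem.Int.mod_lt _ h11⟩
      set q := PySem.Int.floordiv (10 - s) 11 with hqdef
      set q' := PySem.Int.floordiv (10 - (s + 11)) 11 with hq'def
      have hqq : q' = q - 1 := by nlinarith [hq, hq', hm.1, hm.2, hm'.1, hm'.2]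
      split_ifs with h1 h2 h2 <;> omega
    · rw [handleAceLoop, if_neg hs, ih]
      simp only [handle_ace_alt]
      split_ifs with ha hb hb <;> omega

-- ===== VERDICT =====
theorem handle_ace_spec : Claim_equal_handle_ace := by
  intro sum ace _ hpre
  unfold Spec_handle_ace handle_ace
  have : ((ace.toNat : Nat) : Int) = ace := Int.toNat_of_nonneg hpre
  rw [handleAceLoop_eq_alt, this]
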